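-- pv_equiv track=rewrite | github.com/KrakowiakK/localcode | localcode/tool_handlers/patch_handlers.py | _parse_hunks
-- ===== SOURCE A (Python) =====
-- from typing import Any, Dict, List, Optional, Tuple
--
-- def _parse_hunks(change_lines: List[str]) -> List[List[str]]:
--     hunks: List[List[str]] = []
--     current: List[str] = []
--     for line in change_lines:
--         if line.startswith("@@"):
--             if current:
--                 hunks.append(current)
--                 current = []
--             continue
--         if line.startswith("*** End of File"):
--             continue
--         if line[:1] in (" ", "+", "-"):
--             current.append(line)
--             continue
--         if line == "":
--             # Auto-repair: treat empty line as context (space prefix)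
--             current.append(" ")
--             continue
--         raise ValueError(f"invalid patch line: {line}")
--     if current:
--         hunks.append(current)
--     if not hunks:
--         raise ValueError("no changes found in patch")
--     return hunks
-- ===== SOURCE B (Python) =====
-- from typing import List
--
-- def _validated(segment):
--     for line in segment:
--         if line.startswith("*** End of File"):
--             continue
--         if line == "":
--             yield " "
--         elif line[0] in " +-":
--             yield line
--         else:
--             raise ValueError(f"invalid patch line: {line}")
--
-- def _parse_hunks(change_lines: List[str]) -> List[List[str]]:
--     # cut into raw segments at each '@@' header line
--     segments: List[List[str]] = []
--     seg: List[str] = []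
--     for line in change_lines:
--         if line.startswith("@@"):
--             segments.append(seg)
--             seg = []
--         else:
--             seg.append(line)
--     segments.append(seg)
--     hunks = [h for h in (list(_validated(s)) for s in segments) if h]
--     if not hunks:
--         raise ValueError("no changes found in patch")
--     return hunks
-- ===== Notes on version B (the rewrite author's own statement) =====
-- stated objective: alternative
-- what changed: A is a single-pass state machine carrying (hunks, current); B first cuts the lines into raw segments at '@@' headers, then maps a per-segment validator (generator) over them and keeps the non-empty results.
import Mathlib
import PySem

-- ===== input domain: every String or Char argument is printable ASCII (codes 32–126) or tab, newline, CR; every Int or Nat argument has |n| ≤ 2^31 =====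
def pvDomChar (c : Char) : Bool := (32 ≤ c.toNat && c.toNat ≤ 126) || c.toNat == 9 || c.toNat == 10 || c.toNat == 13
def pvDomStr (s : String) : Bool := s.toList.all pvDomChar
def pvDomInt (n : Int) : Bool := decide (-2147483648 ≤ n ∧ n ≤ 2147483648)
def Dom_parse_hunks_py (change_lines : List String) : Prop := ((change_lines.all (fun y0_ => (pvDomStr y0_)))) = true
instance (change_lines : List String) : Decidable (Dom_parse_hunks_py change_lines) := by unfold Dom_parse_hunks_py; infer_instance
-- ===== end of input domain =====

-- B cuts at '@@' headers first and validates each segment afterwards, instead of A's one-pass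
-- (hunks, current) state machine; same O(n) cost, different decomposition. Equivalence is about
-- the returned value on inputs where Python A returns (see Pre_ below).

-- ===== PORT A =====
-- loop body of A's single for-loop; the final else is Python's `raise ValueError` (excluded by Pre_): state kept unchanged
def pvStepA (st : List (List String) × List String) (line : String) : List (List String) × List String :=
  if PySem.Str.startswith line "@@" then
    (if st.2 ≠ [] then (st.1 ++ [st.2], ([] : List String)) else st)
  else if PySem.Str.startswith line "*** End of File" then st
  else if PySem.Str.slice line none (some 1) ∈ ([" ", "+", "-"] : List String) then
    (st.1, st.2 ++ [line])
  else if line = "" then (st.1, st.2 ++ [" "])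
  else st

def parse_hunks_py (change_lines : List String) : List (List String) :=
  let st := change_lines.foldl pvStepA ([], [])
  -- trailing flush; Python raises "no changes found in patch" when the result is empty (excluded by Pre_)
  if st.2 ≠ [] then st.1 ++ [st.2] else st.1

-- ===== PORT B =====
-- segment-cutting loop of Source B
def pvSegStep (st : List (List String) × List String) (line : String) : List (List String) × List String :=
  if PySem.Str.startswith line "@@" then (st.1 ++ [st.2], []) else (st.1, st.2 ++ [line])

def pvSegments (lines : List String) : List (List String) :=
  let st := lines.foldl pvSegStep ([], [])
  st.1 ++ [st.2]

-- one step of Source B's _validated generator; the final else is Python's `raise ValueError` (excluded by Pre_)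
def pvVLine (line : String) : Option String :=
  if PySem.Str.startswith line "*** End of File" then none
  else if line = "" then some " "
  else if PySem.Str.slice line none (some 1) ∈ ([" ", "+", "-"] : List String) then some line
  else none

def pvValidated (seg : List String) : List String := seg.filterMap pvVLine

def parse_hunks_py_alt (change_lines : List String) : List (List String) :=
  ((pvSegments change_lines).map pvValidated).filter (· ≠ [])

-- ===== PRECONDITION & SPEC =====
-- Pre_ = exactly the inputs where Python A returns: every line is a '@@' header, an '*** End of File'
-- marker, empty, or starts with ' '/'+'/'-' (otherwise A raises "invalid patch line"), and at least one
-- line contributes to a hunk (otherwise A raises "no changes found in patch").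
def Pre_parse_hunks_py (change_lines : List String) : Prop :=
  (∀ l ∈ change_lines,
      PySem.Str.startswith l "@@" = true ∨ PySem.Str.startswith l "*** End of File" = true ∨
      PySem.Str.slice l none (some 1) ∈ ([" ", "+", "-"] : List String) ∨ l = "") ∧
  (∃ l ∈ change_lines,
      PySem.Str.slice l none (some 1) ∈ ([" ", "+", "-"] : List String) ∨ l = "")
instance (change_lines : List String) : Decidable (Pre_parse_hunks_py change_lines) := by
  unfold Pre_parse_hunks_py; infer_instance

def pvWitness_parse_hunks_py : List String := ["@@ -1,2 +1,2 @@", " ctx", "-old", "+new", ""]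

def Spec_parse_hunks_py (change_lines : List String) (out : List (List String)) : Prop := out = parse_hunks_py_alt change_lines
instance (change_lines : List String) (out : List (List String)) : Decidable (Spec_parse_hunks_py change_lines out) := by unfold Spec_parse_hunks_py; infer_instance

-- ===== CLAIM (what is proved, stated in full; the proofs are below) =====
def Claim_equal_parse_hunks_py : Prop := ∀ (change_lines : List String), Dom_parse_hunks_py change_lines → Pre_parse_hunks_py change_lines → Spec_parse_hunks_py change_lines (parse_hunks_py change_lines)

-- ===== LEMMAS AND PROOFS =====

theorem pvValidated_nil : pvValidated [] = [] := rfl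

-- B's segment fold with a non-empty accumulator = accumulator ++ fold from empty
theorem pvSegStep_acc (lines : List String) :
    ∀ (acc : List (List String)) (seg : List String),
      lines.foldl pvSegStep (acc, seg)
        = (acc ++ (lines.foldl pvSegStep ([], seg)).1, (lines.foldl pvSegStep ([], seg)).2) := by
  induction lines with
  | nil => intro acc seg; simp
  | cons l rest ih =>
    intro acc seg
    simp only [List.foldl_cons, pvSegStep]
    cases h : PySem.Str.startswith l "@@"
    · simp only [Bool.false_eq_true, if_false, List.nil_append]
      exact ih acc (seg ++ [l])
    · simp only [if_true]
      rw [ih (acc ++ [seg]) [], ih ([] ++ [seg]) []]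
      simp
-- validating one more raw line
theorem pvValidated_snoc (C : List String) (l : String) :
    pvValidated (C ++ [l]) = pvValidated C ++ (pvVLine l).toList := by
  simp only [pvValidated, List.filterMap_append]
  cases h : pvVLine l <;> simp [List.filterMap, h]

-- A's step on a non-'@@' line acts on the validated current exactly as B's validator does
theorem pvStepA_non_header (H : List (List String)) (C : List String) (l : String)
    (h : PySem.Str.startswith l "@@" = false) :
    pvStepA (H, pvValidated C) l = (H, pvValidated (C ++ [l])) := by
  rw [pvValidated_snoc]
  simp only [pvStepA, pvVLine, h, Bool.false_eq_true, if_false]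
  cases h1 : PySem.Str.startswith l "*** End of File"
  · simp only [Bool.false_eq_true, if_false]
    by_cases h2 : PySem.Str.slice l none (some 1) ∈ ([" ", "+", "-"] : List String)
    · have hne : l ≠ "" := by intro he; subst he; revert h2; decide
      rw [if_pos h2, if_neg hne, if_pos h2]
      simp
    · rw [if_neg h2]
      by_cases h3 : l = ""
      · rw [if_pos h3, if_pos h3]; simp
      · rw [if_neg h3, if_neg h3, if_neg h2]; simp
  · simp

-- main invariant: A's flushed fold from (H, validated C) equals H ++ B's pipeline on segments from C
theorem pvMain (lines : List String) :
    ∀ (H : List (List String)) (C : List String),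
      (let st := lines.foldl pvStepA (H, pvValidated C);
        if st.2 ≠ [] then st.1 ++ [st.2] else st.1)
      = H ++ ((((lines.foldl pvSegStep ([], C)).1 ++ [(lines.foldl pvSegStep ([], C)).2]).map
                pvValidated).filter (· ≠ [])) := by
  induction lines with
  | nil =>
    intro H C
    simp only [List.foldl_nil]
    by_cases h : pvValidated C = [] <;> simp [h]
  | cons l rest ih =>
    intro H C
    simp only [List.foldl_cons]
    cases h : PySem.Str.startswith l "@@"
    · rw [show pvStepA (H, pvValidated C) l = (H, pvValidated (C ++ [l])) from
        pvStepA_non_header H C l h]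
      have hB : pvSegStep ([], C) l = ([], C ++ [l]) := by
        simp only [pvSegStep, h, Bool.false_eq_true, if_false]
      rw [hB, ih H (C ++ [l])]
    · have hA : pvStepA (H, pvValidated C) l
          = (H ++ ([pvValidated C].filter (· ≠ [])), pvValidated []) := by
        simp only [pvStepA, h, if_true]
        by_cases hc : pvValidated C = []
        · simp [hc, pvValidated_nil]
        · simp [hc, pvValidated_nil]
      have hB : pvSegStep ([], C) l = ([C], []) := by
        simp only [pvSegStep, h, if_true, List.nil_append]
      rw [hA, hB, ih (H ++ ([pvValidated C].filter (· ≠ []))) [],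
          pvSegStep_acc rest [C] []]
      by_cases hc : pvValidated C = [] <;>
        simp [List.filter_append, List.filter_cons, List.append_assoc, hc]

-- ===== VERDICT (by name: the statement is the Claim_ definition above) =====
theorem parse_hunks_py_spec : Claim_equal_parse_hunks_py := by
  intro change_lines _ _
  unfold Spec_parse_hunks_py parse_hunks_py parse_hunks_py_alt pvSegments
  have := pvMain change_lines [] []
  simpa [pvValidated] using this
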